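-- pv_equiv track=rewrite | github.com/ms-xie/ChatMock | chatmock/reasoning.py | extract_reasoning_from_model_name
-- ===== SOURCE A (Python) =====
-- from typing import Any, Dict, List
--
-- def extract_reasoning_from_model_name(model: str | None) -> Dict[str, Any] | None:
--     """Infer reasoning overrides from a model."""
--
--     force_minimal = False
--
--     if not isinstance(model, str) or not model:
--         return None, force_minimal
--     s = model.strip().lower()
--     if not s:
--         return None, force_minimal
--     efforts = {"minimal", "low", "medium", "high", "mini", "xhigh"}
--
--     if ":" in s:
--         maybe = s.rsplit(":", 1)[-1].strip()
--         if maybe in efforts: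
--             return {"effort": maybe}, force_minimal
--
--     for sep in ("-", "_"):
--         if s.endswith(sep + "minimal"):
--             return {"effort": "minimal"}, force_minimal
--         if s.endswith(sep + "mini"):
--             if 'codex' in s:
--                 return None, force_minimal
--
--             # this is for fake `gpt-5-mini`/`gpt-5.1-mini`
--             force_minimal = True
--             if '5.1' in s:
--                 return {"effort": "none"}, force_minimal
--             else:
--                 return {"effort": "minimal"}, force_minimal
--         if s.endswith(sep + "low"):
--             return {"effort": "low"}, force_minimal
--         if s.endswith(sep + "medium"):
--             return {"effort": "medium"}, force_minimal
--         if s.endswith(sep + "high"):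
--             return {"effort": "high"}, force_minimal
--
--     return None, force_minimal
-- ===== SOURCE B (Python) =====
-- def extract_reasoning_from_model_name(model):
--     force_minimal = False
--     if not isinstance(model, str) or not model:
--         return None, force_minimal
--     s = model.strip().lower()
--     if not s:
--         return None, force_minimal
--     if ":" in s:
--         maybe = s.rsplit(":", 1)[-1].strip()
--         if maybe in {"minimal", "low", "medium", "high", "mini", "xhigh"}:
--             return {"effort": maybe}, force_minimal
--     # one left-to-right pass: keep the text seen since the most recent '-' or '_'
--     token = None
--     for ch in s:
--         if ch in "-_":
--             token = ""
--         elif token is not None: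
--             token += ch
--     if token in ("minimal", "low", "medium", "high"):
--         return {"effort": token}, force_minimal
--     if token == "mini":
--         if "codex" in s:
--             return None, force_minimal
--         if "5.1" in s:
--             return {"effort": "none"}, True
--         return {"effort": "minimal"}, True
--     return None, force_minimal
-- ===== Notes on version B (the rewrite author's own statement) =====
-- stated objective: alternative
-- what changed: A's nested loop over the two separator characters with a five-way endswith chain is replaced by a single left-to-right pass that maintains the text seen after the most recent separator (hyphen or underscore) and then dispatches once on exact equality of that trailing token; the colon branch is kept unchanged.
import Mathlib
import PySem

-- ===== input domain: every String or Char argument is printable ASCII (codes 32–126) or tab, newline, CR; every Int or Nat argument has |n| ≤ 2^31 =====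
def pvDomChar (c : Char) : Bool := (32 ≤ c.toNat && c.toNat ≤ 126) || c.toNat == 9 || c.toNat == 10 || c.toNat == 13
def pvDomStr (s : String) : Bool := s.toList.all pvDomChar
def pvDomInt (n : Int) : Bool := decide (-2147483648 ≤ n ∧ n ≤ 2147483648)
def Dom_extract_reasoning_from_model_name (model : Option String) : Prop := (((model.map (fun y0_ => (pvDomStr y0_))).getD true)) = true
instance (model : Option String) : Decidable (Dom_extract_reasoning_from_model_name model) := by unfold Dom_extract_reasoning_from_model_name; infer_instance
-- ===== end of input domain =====

-- B replaces A's nested separator × endswith-chain loop by a single left-to-right pass that keeps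
-- the text after the most recent '-'/'_' and dispatches once on that trailing token (objective: alternative decomposition).

-- ===== PORT A =====
-- the string literals of the Python source, as character lists
def pvW_minimal : List Char := ['m','i','n','i','m','a','l']
def pvW_mini : List Char := ['m','i','n','i']
def pvW_low : List Char := ['l','o','w']
def pvW_medium : List Char := ['m','e','d','i','u','m']
def pvW_high : List Char := ['h','i','g','h']
def pvW_xhigh : List Char := ['x','h','i','g','h']
def pvW_codex : List Char := ['c','o','d','e','x']
def pvW_51 : List Char := ['5','.','1']

-- efforts = {"minimal", "low", "medium", "high", "mini", "xhigh"}
def pvEffortsA : List (List Char) :=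
  [pvW_minimal, pvW_low, pvW_medium, pvW_high, pvW_mini, pvW_xhigh]

-- the `if ":" in s:` block; s.rsplit(":", 1)[-1] is ported by hand as the part after the
-- LAST ':' (exact when ':' occurs in s, which the surrounding `isIn` guard guarantees)
def pvColonA (s : List Char) : Option ((Option (List (String × String))) × Bool) :=
  if PySem.Chars.isIn [':'] s then
    let maybe := PySem.Chars.strip (s.drop (PySem.Chars.rfind s [':'] + 1).toNat)
    if pvEffortsA.contains maybe then some (some [("effort", String.ofList maybe)], false) else none
  else none

-- one iteration of `for sep in ("-", "_"):` — the endswith chain, `some r` = early return r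
def pvSepA (s : List Char) (sep : Char) : Option ((Option (List (String × String))) × Bool) :=
  if PySem.Chars.endswith s (sep :: pvW_minimal) then some (some [("effort", "minimal")], false)
  else if PySem.Chars.endswith s (sep :: pvW_mini) then
    if PySem.Chars.isIn pvW_codex s then some (none, false)
    else if PySem.Chars.isIn pvW_51 s then some (some [("effort", "none")], true)
    else some (some [("effort", "minimal")], true)
  else if PySem.Chars.endswith s (sep :: pvW_low) then some (some [("effort", "low")], false)
  else if PySem.Chars.endswith s (sep :: pvW_medium) then some (some [("effort", "medium")], false)
  else if PySem.Chars.endswith s (sep :: pvW_high) then some (some [("effort", "high")], false)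
  else none

def extract_reasoning_from_model_name (model : Option String) : (Option (List (String × String))) × Bool :=
  match model with
  | none => (none, false)                    -- not isinstance(model, str)
  | some m =>
    if m.toList = [] then (none, false)      -- not model
    else
      let s := PySem.Chars.lower (PySem.Chars.strip m.toList)
      if s = [] then (none, false)
      else
        match pvColonA s with
        | some r => r
        | none =>
          match ['-', '_'].findSome? (pvSepA s) with
          | some r => r
          | none => (none, false)

-- ===== PORT B =====
-- `token = "" if ch is a separator else token + ch (if token is not None)` — the fold step of B's single pass
def pvTokStep (acc : Option (List Char)) (c : Char) : Option (List Char) :=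
  if c = '-' ∨ c = '_' then some []
  else match acc with
       | some t => some (t ++ [c])
       | none => none

-- identical to pvColonA: B leaves the colon branch unchanged
def pvColonB (s : List Char) : Option ((Option (List (String × String))) × Bool) :=
  if PySem.Chars.isIn [':'] s then
    let maybe := PySem.Chars.strip (s.drop (PySem.Chars.rfind s [':'] + 1).toNat)
    if pvEffortsA.contains maybe then some (some [("effort", String.ofList maybe)], false) else none
  else none

def extract_reasoning_from_model_name_alt (model : Option String) : (Option (List (String × String))) × Bool :=
  match model with
  | none => (none, false)
  | some m =>
    if m.toList = [] then (none, false)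
    else
      let s := PySem.Chars.lower (PySem.Chars.strip m.toList)
      if s = [] then (none, false)
      else
        match pvColonB s with
        | some r => r
        | none =>
          match s.foldl pvTokStep none with
          | none => (none, false)
          | some t =>
            if t = pvW_minimal ∨ t = pvW_low ∨ t = pvW_medium ∨ t = pvW_high then
              (some [("effort", String.ofList t)], false)
            else if t = pvW_mini then
              if PySem.Chars.isIn pvW_codex s then (none, false)
              else if PySem.Chars.isIn pvW_51 s then (some [("effort", "none")], true)
              else (some [("effort", "minimal")], true)
            else (none, false)

-- ===== PRECONDITION & SPEC =====
def Spec_extract_reasoning_from_model_name (model : Option String) (out : (Option (List (String × String))) × Bool) : Prop := out = extract_reasoning_from_model_name_alt model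
instance (model : Option String) (out : (Option (List (String × String))) × Bool) : Decidable (Spec_extract_reasoning_from_model_name model out) := by unfold Spec_extract_reasoning_from_model_name; infer_instance

-- ===== CLAIM (what is proved, stated in full; the proofs are below) =====
def Claim_equal_extract_reasoning_from_model_name : Prop := ∀ (model : Option String), Dom_extract_reasoning_from_model_name model → Spec_extract_reasoning_from_model_name model (extract_reasoning_from_model_name model)

-- ===== LEMMAS AND PROOFS =====

def pvSepFree (w : List Char) : Prop := ∀ c ∈ w, ¬ (c = '-' ∨ c = '_')

theorem pvTok_acc (w : List Char) (hw : pvSepFree w) (t : List Char) :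
    w.foldl pvTokStep (some t) = some (t ++ w) := by
  induction w generalizing t with
  | nil => simp
  | cons c w ih =>
    have hc := hw c (by simp)
    have hrest : pvSepFree w := fun d hd => hw d (by simp [hd])
    simp [List.foldl_cons, pvTokStep, hc, ih hrest]

theorem pvTok_of_suffix {sep : Char} {w s : List Char}
    (hsep : sep = '-' ∨ sep = '_') (hsuf : (sep :: w) <:+ s) (hw : pvSepFree w) :
    s.foldl pvTokStep none = some w := by
  obtain ⟨pre, hpre⟩ := hsuf
  subst hpre
  have : pre ++ sep :: w = (pre ++ [sep]) ++ w := by simp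
  rw [this, List.foldl_append, List.foldl_append]
  simp [pvTokStep, hsep, pvTok_acc w hw]

theorem pvSuffix_of_tok {s w : List Char} (h : s.foldl pvTokStep none = some w) :
    ∃ sep, (sep = '-' ∨ sep = '_') ∧ (sep :: w) <:+ s := by
  induction s using List.reverseRecOn generalizing w with
  | nil => simp at h
  | append_singleton s c ih =>
    rw [List.foldl_append] at h
    simp only [List.foldl_cons, List.foldl_nil] at h
    by_cases hc : c = '-' ∨ c = '_'
    · simp [pvTokStep, hc] at h
      exact ⟨c, hc, by simp [← h]⟩
    · simp only [pvTokStep, hc] at h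
      cases ht : s.foldl pvTokStep none with
      | none => rw [ht] at h; simp at h
      | some t =>
        rw [ht] at h
        simp at h
        obtain ⟨sep, hsep, pre, hpre⟩ := ih ht
        exact ⟨sep, hsep, pre, by rw [← h, ← hpre]; simp⟩

-- if the trailing token is not w (w separator-free), s does not end with sep + w
theorem pvEnds_false {s w : List Char} (sep : Char) (hsep : sep = '-' ∨ sep = '_')
    (hw : pvSepFree w) (hne : s.foldl pvTokStep none ≠ some w) :
    PySem.Chars.endswith s (sep :: w) = false := by
  cases he : PySem.Chars.endswith s (sep :: w) with
  | false => rfl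
  | true =>
    exact absurd (pvTok_of_suffix hsep ((PySem.Chars.endswith_iff _ _).mp he) hw) hne

theorem pvSepFree_minimal : pvSepFree pvW_minimal := by intro c hc; fin_cases hc <;> simp
theorem pvSepFree_mini : pvSepFree pvW_mini := by intro c hc; fin_cases hc <;> simp
theorem pvSepFree_low : pvSepFree pvW_low := by intro c hc; fin_cases hc <;> simp
theorem pvSepFree_medium : pvSepFree pvW_medium := by intro c hc; fin_cases hc <;> simp
theorem pvSepFree_high : pvSepFree pvW_high := by intro c hc; fin_cases hc <;> simp

theorem pvOf_minimal : String.ofList pvW_minimal = "minimal" := rfl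
theorem pvOf_low : String.ofList pvW_low = "low" := rfl
theorem pvOf_medium : String.ofList pvW_medium = "medium" := rfl
theorem pvOf_high : String.ofList pvW_high = "high" := rfl

-- the core: A's separator loop equals B's token dispatch
theorem pvFind_eq (s w : List Char) (res : (Option (List (String × String))) × Bool)
    (hval : ∀ sp, sp = '-' ∨ sp = '_' →
      pvSepA s sp = if PySem.Chars.endswith s (sp :: w) = true then some res else none)
    (hor : PySem.Chars.endswith s ('-' :: w) = true ∨ PySem.Chars.endswith s ('_' :: w) = true) :
    ['-', '_'].findSome? (pvSepA s) = some res := by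
  cases hd : PySem.Chars.endswith s ('-' :: w) with
  | true => simp [hval '-' (Or.inl rfl), hd]
  | false =>
    have h2 : PySem.Chars.endswith s ('_' :: w) = true := by
      rcases hor with h | h
      · rw [hd] at h; cases h
      · exact h
    simp [hval '-' (Or.inl rfl), hval '_' (Or.inr rfl), hd, h2]

theorem pvCore (s : List Char) :
    (match ['-', '_'].findSome? (pvSepA s) with
     | some r => r
     | none => ((none : Option (List (String × String))), false)) =
    (match s.foldl pvTokStep none with
     | none => ((none : Option (List (String × String))), false)
     | some t =>
       if t = pvW_minimal ∨ t = pvW_low ∨ t = pvW_medium ∨ t = pvW_high then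
         (some [("effort", String.ofList t)], false)
       else if t = pvW_mini then
         if PySem.Chars.isIn pvW_codex s then (none, false)
         else if PySem.Chars.isIn pvW_51 s then (some [("effort", "none")], true)
         else (some [("effort", "minimal")], true)
       else (none, false)) := by
  cases htok : s.foldl pvTokStep none with
  | none =>
    have hA : ∀ sep, sep = '-' ∨ sep = '_' → pvSepA s sep = none := by
      intro sep hsep
      unfold pvSepA
      rw [pvEnds_false sep hsep pvSepFree_minimal (by simp [htok]),
          pvEnds_false sep hsep pvSepFree_mini (by simp [htok]),
          pvEnds_false sep hsep pvSepFree_low (by simp [htok]),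
          pvEnds_false sep hsep pvSepFree_medium (by simp [htok]),
          pvEnds_false sep hsep pvSepFree_high (by simp [htok])]
      simp
    simp [hA '-' (Or.inl rfl), hA '_' (Or.inr rfl)]
  | some t =>
    obtain ⟨sep, hsep, hsuf⟩ := pvSuffix_of_tok htok
    have hends : PySem.Chars.endswith s (sep :: t) = true := (PySem.Chars.endswith_iff _ _).mpr hsuf
    have hor : PySem.Chars.endswith s ('-' :: t) = true ∨ PySem.Chars.endswith s ('_' :: t) = true := by
      rcases hsep with rfl | rfl
      · exact Or.inl hends
      · exact Or.inr hends
    have hne : ∀ w : List Char, pvSepFree w → w ≠ t →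
        ∀ sp, sp = '-' ∨ sp = '_' → PySem.Chars.endswith s (sp :: w) = false := by
      intro w hw hwne sp hsp
      exact pvEnds_false sp hsp hw (by simp [htok]; exact fun h => hwne h.symm)
    by_cases h1 : t = pvW_minimal
    · subst h1
      have hval : ∀ sp, sp = '-' ∨ sp = '_' → pvSepA s sp =
          if PySem.Chars.endswith s (sp :: pvW_minimal) = true then
            some (some [("effort", "minimal")], false) else none := by
        intro sp hsp
        unfold pvSepA
        rw [hne _ pvSepFree_mini (by simp [pvW_mini, pvW_minimal]) sp hsp,
            hne _ pvSepFree_low (by simp [pvW_low, pvW_minimal]) sp hsp,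
            hne _ pvSepFree_medium (by simp [pvW_medium, pvW_minimal]) sp hsp,
            hne _ pvSepFree_high (by simp [pvW_high, pvW_minimal]) sp hsp]
        simp only [Bool.false_eq_true, if_false]
      rw [pvFind_eq s pvW_minimal _ hval hor]
      simp [pvOf_minimal]
    · by_cases h2 : t = pvW_mini
      · subst h2
        have hval : ∀ sp, sp = '-' ∨ sp = '_' → pvSepA s sp =
            if PySem.Chars.endswith s (sp :: pvW_mini) = true then
              some (if PySem.Chars.isIn pvW_codex s then ((none : Option (List (String × String))), false)
                    else if PySem.Chars.isIn pvW_51 s then (some [("effort", "none")], true)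
                    else (some [("effort", "minimal")], true)) else none := by
          intro sp hsp
          unfold pvSepA
          rw [hne _ pvSepFree_minimal (by simp [pvW_mini, pvW_minimal]) sp hsp]
          by_cases he : PySem.Chars.endswith s (sp :: pvW_mini) = true
          · simp only [Bool.false_eq_true, if_false, he, if_true]
            (repeat' split) <;> rfl
          · rw [hne _ pvSepFree_low (by simp [pvW_low, pvW_mini]) sp hsp,
                hne _ pvSepFree_medium (by simp [pvW_medium, pvW_mini]) sp hsp,
                hne _ pvSepFree_high (by simp [pvW_high, pvW_mini]) sp hsp]
            simp [he]
        rw [pvFind_eq s pvW_mini _ hval hor]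
        simp [pvW_mini, pvW_minimal, pvW_low, pvW_medium, pvW_high]
      · by_cases h3 : t = pvW_low
        · subst h3
          have hval : ∀ sp, sp = '-' ∨ sp = '_' → pvSepA s sp =
              if PySem.Chars.endswith s (sp :: pvW_low) = true then
                some (some [("effort", "low")], false) else none := by
            intro sp hsp
            unfold pvSepA
            rw [hne _ pvSepFree_minimal (by simp [pvW_low, pvW_minimal]) sp hsp,
                hne _ pvSepFree_mini (by simp [pvW_low, pvW_mini]) sp hsp,
                hne _ pvSepFree_medium (by simp [pvW_low, pvW_medium]) sp hsp,
                hne _ pvSepFree_high (by simp [pvW_low, pvW_high]) sp hsp]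
            simp only [Bool.false_eq_true, if_false]
          rw [pvFind_eq s pvW_low _ hval hor]
          simp [pvOf_low]
        · by_cases h4 : t = pvW_medium
          · subst h4
            have hval : ∀ sp, sp = '-' ∨ sp = '_' → pvSepA s sp =
                if PySem.Chars.endswith s (sp :: pvW_medium) = true then
                  some (some [("effort", "medium")], false) else none := by
              intro sp hsp
              unfold pvSepA
              rw [hne _ pvSepFree_minimal (by simp [pvW_medium, pvW_minimal]) sp hsp,
                  hne _ pvSepFree_mini (by simp [pvW_medium, pvW_mini]) sp hsp,
                  hne _ pvSepFree_low (by simp [pvW_medium, pvW_low]) sp hsp,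
                  hne _ pvSepFree_high (by simp [pvW_medium, pvW_high]) sp hsp]
              simp only [Bool.false_eq_true, if_false]
            rw [pvFind_eq s pvW_medium _ hval hor]
            simp [pvOf_medium]
          · by_cases h5 : t = pvW_high
            · subst h5
              have hval : ∀ sp, sp = '-' ∨ sp = '_' → pvSepA s sp =
                  if PySem.Chars.endswith s (sp :: pvW_high) = true then
                    some (some [("effort", "high")], false) else none := by
                intro sp hsp
                unfold pvSepA
                rw [hne _ pvSepFree_minimal (by simp [pvW_high, pvW_minimal]) sp hsp,
                    hne _ pvSepFree_mini (by simp [pvW_high, pvW_mini]) sp hsp,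
                    hne _ pvSepFree_low (by simp [pvW_high, pvW_low]) sp hsp,
                    hne _ pvSepFree_medium (by simp [pvW_high, pvW_medium]) sp hsp]
                simp only [Bool.false_eq_true, if_false]
              rw [pvFind_eq s pvW_high _ hval hor]
              simp [pvOf_high]
            · -- t is none of the five words: both sides return (none, false)
              have hA : ∀ sp, sp = '-' ∨ sp = '_' → pvSepA s sp = none := by
                intro sp hsp
                unfold pvSepA
                rw [hne _ pvSepFree_minimal (Ne.symm h1) sp hsp,
                    hne _ pvSepFree_mini (Ne.symm h2) sp hsp,
                    hne _ pvSepFree_low (Ne.symm h3) sp hsp,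
                    hne _ pvSepFree_medium (Ne.symm h4) sp hsp,
                    hne _ pvSepFree_high (Ne.symm h5) sp hsp]
                simp
              simp [hA '-' (Or.inl rfl), hA '_' (Or.inr rfl), h1, h2, h3, h4, h5]

theorem pvColon_eq : pvColonA = pvColonB := rfl

-- ===== VERDICT (by name: the statement is the Claim_ definition above) =====
theorem extract_reasoning_from_model_name_spec : Claim_equal_extract_reasoning_from_model_name := by
  intro model _
  unfold Spec_extract_reasoning_from_model_name
  cases model with
  | none => rfl
  | some m =>
    unfold extract_reasoning_from_model_name extract_reasoning_from_model_name_alt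
    by_cases h0 : m.toList = []
    · simp [h0]
    · simp only [h0, ← pvColon_eq]
      set s := PySem.Chars.lower (PySem.Chars.strip m.toList) with hs
      by_cases h1 : s = []
      · simp [h1]
      · simp only [h1]
        cases hc : pvColonA s with
        | some r => rfl
        | none => exact pvCore s
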